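-- pv_equiv track=rewrite | github.com/akhilmw/DSA | BasicDSA/Multi-Dimensional-Arrays/sumOfZeroes.py | coverageOfMatrix
-- ===== SOURCE A (Python) =====
-- def countOnes(mat, a, b, c, d, rows, col):
--     count = 0
--     if a >=0 and mat[a][c+1] == 1:    #top
--         count += 1
--     if b <= rows-1 and mat[b][c+1] == 1:  #bottom
--         count += 1
--     if c >= 0 and mat[a+1][c] == 1:       #left
--         count += 1
--     if d <= col-1 and mat[a+1][d] == 1:    #right
--         count += 1
--     return count
--
-- def coverageOfMatrix(mat):
--     count = 0
--     rows = len(mat)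
--     col = len(mat[0])
--
--     for i in range(rows):
--         for j in range(col):
--             if mat[i][j] == 0:
--                 count += countOnes(mat, i-1, i+1, j-1, j+1, rows, col)
--
--     return count
-- ===== SOURCE B (Python) =====
-- def coverageOfMatrix(mat):
--     rows = len(mat)
--     col = len(mat[0])
--     count = 0
--     for i in range(rows):
--         for j in range(col):
--             v = mat[i][j]
--             if j + 1 < col:
--                 w = mat[i][j + 1]
--                 if (v == 0 and w == 1) or (v == 1 and w == 0):
--                     count += 1
--             if i + 1 < rows:
--                 w = mat[i + 1][j]
--                 if (v == 0 and w == 1) or (v == 1 and w == 0):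
--                     count += 1
--     return count
-- ===== Notes on version B (the rewrite author's own statement) =====
-- stated objective: alternative
-- what changed: B replaces A's per-zero-cell probe of four neighbours (via the countOnes helper with shifted indices) by a single edge scan that looks only at each cell's right and bottom neighbour and counts unordered {0,1} adjacencies once each.
import Mathlib
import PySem

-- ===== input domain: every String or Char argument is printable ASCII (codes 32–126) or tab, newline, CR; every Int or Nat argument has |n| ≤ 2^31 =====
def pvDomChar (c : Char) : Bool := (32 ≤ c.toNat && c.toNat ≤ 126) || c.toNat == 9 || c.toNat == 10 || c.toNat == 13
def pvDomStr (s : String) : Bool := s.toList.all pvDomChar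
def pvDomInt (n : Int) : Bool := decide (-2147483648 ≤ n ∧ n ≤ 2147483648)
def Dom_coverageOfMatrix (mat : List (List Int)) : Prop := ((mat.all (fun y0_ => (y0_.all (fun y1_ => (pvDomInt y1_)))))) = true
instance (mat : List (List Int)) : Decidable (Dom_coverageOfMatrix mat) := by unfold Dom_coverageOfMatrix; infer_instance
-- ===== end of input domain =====

-- B scans each (right, bottom) adjacency once instead of probing four neighbours of every zero cell; same cost, different decomposition.

-- shared indexing helper: mat[i][j] (Python indexing; default only reached on inputs outside Pre_, where Python raises)
def pvCell (mat : List (List Int)) (i j : Int) : Int :=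
  PySem.List.pyGetD (PySem.List.pyGetD mat i []) j 0

-- ===== PORT A =====
def countOnes (mat : List (List Int)) (a b c d rows col : Int) : Int :=
  let count : Int := 0
  let count := if a ≥ 0 ∧ pvCell mat a (c+1) = 1 then count + 1 else count      -- top
  let count := if b ≤ rows - 1 ∧ pvCell mat b (c+1) = 1 then count + 1 else count  -- bottom
  let count := if c ≥ 0 ∧ pvCell mat (a+1) c = 1 then count + 1 else count      -- left
  let count := if d ≤ col - 1 ∧ pvCell mat (a+1) d = 1 then count + 1 else count   -- right
  count

def coverageOfMatrix (mat : List (List Int)) : Int :=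
  let rows : Int := mat.length
  let col : Int := (PySem.List.pyGetD mat 0 []).length
  (PySem.List.pyRange 0 rows 1).foldl (fun count i =>
    (PySem.List.pyRange 0 col 1).foldl (fun count j =>
      if pvCell mat i j = 0 then
        count + countOnes mat (i-1) (i+1) (j-1) (j+1) rows col
      else count) count) 0

-- ===== PORT B =====
def coverageOfMatrix_alt (mat : List (List Int)) : Int :=
  let rows : Int := mat.length
  let col : Int := (PySem.List.pyGetD mat 0 []).length
  (PySem.List.pyRange 0 rows 1).foldl (fun count i =>
    (PySem.List.pyRange 0 col 1).foldl (fun count j =>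
      let v := pvCell mat i j
      let count := if j + 1 < col ∧ ((v = 0 ∧ pvCell mat i (j+1) = 1) ∨ (v = 1 ∧ pvCell mat i (j+1) = 0)) then count + 1 else count
      let count := if i + 1 < rows ∧ ((v = 0 ∧ pvCell mat (i+1) j = 1) ∨ (v = 1 ∧ pvCell mat (i+1) j = 0)) then count + 1 else count
      count) count) 0

-- ===== PRECONDITION & SPEC =====
-- Pre_ excludes exactly the inputs where Python A raises IndexError: the empty matrix (len(mat[0]))
-- and matrices with a row shorter than row 0 (the loop probes mat[i][j] for every j < len(mat[0])).
def Pre_coverageOfMatrix (mat : List (List Int)) : Prop :=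
  mat ≠ [] ∧ ∀ row ∈ mat, (mat.headD []).length ≤ row.length
instance (mat : List (List Int)) : Decidable (Pre_coverageOfMatrix mat) := by unfold Pre_coverageOfMatrix; infer_instance
def pvWitness_coverageOfMatrix : List (List Int) := [[0, 1], [1, 0]]

def Spec_coverageOfMatrix (mat : List (List Int)) (out : Int) : Prop := out = coverageOfMatrix_alt mat
instance (mat : List (List Int)) (out : Int) : Decidable (Spec_coverageOfMatrix mat out) := by unfold Spec_coverageOfMatrix; infer_instance

-- ===== CLAIM (what is proved, stated in full; the proofs are below) =====
def Claim_equal_coverageOfMatrix : Prop := ∀ (mat : List (List Int)), Dom_coverageOfMatrix mat → Pre_coverageOfMatrix mat → Spec_coverageOfMatrix mat (coverageOfMatrix mat)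

-- ===== LEMMAS AND PROOFS =====

-- nat-indexed cell access
def pvAt (mat : List (List Int)) (i j : Nat) : Int := ((mat.getD i []).getD j 0)

theorem pvCell_natCast (mat : List (List Int)) (i j : Nat) :
    pvCell mat (i : Int) (j : Int) = pvAt mat i j := by
  simp [pvCell, pvAt, PySem.List.pyGetD_natCast]

-- sum over pyRange 0 n 1 is a Finset.range sum
theorem pv_sum_pyRange (n : Nat) (f : Int → Int) :
    ((PySem.List.pyRange 0 (n : Int) 1).map f).sum = ∑ k ∈ Finset.range n, f (k : Int) := by
  rw [PySem.List.pyRange_zero_natCast, List.map_map]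
  induction n with
  | zero => simp
  | succ m ih => rw [List.range_succ, Finset.sum_range_succ, ← ih]; simp

-- a foldl whose step adds something per element is a sum
theorem pv_foldl_step (l : List Int) (a : Int) (step : Int → Int → Int) (g : Int → Int)
    (h : ∀ c x, step c x = c + g x) : l.foldl step a = a + (l.map g).sum := by
  induction l generalizing a with
  | nil => simp
  | cons x t ih => simp only [List.foldl, h, ih, List.map, List.sum_cons]; ring

-- int-indexed cell at nonnegative indices
theorem pvCell_toNat (mat : List (List Int)) (i j : Int) (hi : 0 ≤ i) (hj : 0 ≤ j) :
    pvCell mat i j = pvAt mat i.toNat j.toNat := by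
  have h := pvCell_natCast mat i.toNat j.toNat
  rwa [Int.toNat_of_nonneg hi, Int.toNat_of_nonneg hj] at h

-- A's per-cell contribution, in nat indices
theorem pv_A_cell (mat : List (List Int)) (Rn Cn i j : Nat) :
    (if pvCell mat (i : Int) (j : Int) = 0 then
        countOnes mat ((i:Int)-1) ((i:Int)+1) ((j:Int)-1) ((j:Int)+1) (Rn : Int) (Cn : Int) else 0)
    = (if pvAt mat i j = 0 ∧ 1 ≤ i ∧ pvAt mat (i-1) j = 1 then (1:Int) else 0)
    + (if pvAt mat i j = 0 ∧ i+1 < Rn ∧ pvAt mat (i+1) j = 1 then (1:Int) else 0)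
    + (if pvAt mat i j = 0 ∧ 1 ≤ j ∧ pvAt mat i (j-1) = 1 then (1:Int) else 0)
    + (if pvAt mat i j = 0 ∧ j+1 < Cn ∧ pvAt mat i (j+1) = 1 then (1:Int) else 0) := by
  have e1 : ((i:Int) - 1 ≥ 0 ∧ pvCell mat ((i:Int)-1) ((j:Int)-1+1) = 1) ↔ (1 ≤ i ∧ pvAt mat (i-1) j = 1) := by
    constructor
    · rintro ⟨h1, h2⟩
      rw [pvCell_toNat mat _ _ (by omega) (by omega)] at h2
      refine ⟨by omega, ?_⟩; convert h2 using 2 <;> omega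
    · rintro ⟨h1, h2⟩
      refine ⟨by omega, ?_⟩
      rw [pvCell_toNat mat _ _ (by omega) (by omega)]
      convert h2 using 2 <;> omega
  have e2 : ((i:Int) + 1 ≤ (Rn:Int) - 1 ∧ pvCell mat ((i:Int)+1) ((j:Int)-1+1) = 1) ↔ (i+1 < Rn ∧ pvAt mat (i+1) j = 1) := by
    constructor
    · rintro ⟨h1, h2⟩
      rw [pvCell_toNat mat _ _ (by omega) (by omega)] at h2
      refine ⟨by omega, ?_⟩; convert h2 using 2 <;> omega
    · rintro ⟨h1, h2⟩
      refine ⟨by omega, ?_⟩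
      rw [pvCell_toNat mat _ _ (by omega) (by omega)]
      convert h2 using 2 <;> omega
  have e3 : ((j:Int) - 1 ≥ 0 ∧ pvCell mat ((i:Int)-1+1) ((j:Int)-1) = 1) ↔ (1 ≤ j ∧ pvAt mat i (j-1) = 1) := by
    constructor
    · rintro ⟨h1, h2⟩
      rw [pvCell_toNat mat _ _ (by omega) (by omega)] at h2
      refine ⟨by omega, ?_⟩; convert h2 using 2 <;> omega
    · rintro ⟨h1, h2⟩
      refine ⟨by omega, ?_⟩
      rw [pvCell_toNat mat _ _ (by omega) (by omega)]
      convert h2 using 2 <;> omega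
  have e4 : ((j:Int) + 1 ≤ (Cn:Int) - 1 ∧ pvCell mat ((i:Int)-1+1) ((j:Int)+1) = 1) ↔ (j+1 < Cn ∧ pvAt mat i (j+1) = 1) := by
    constructor
    · rintro ⟨h1, h2⟩
      rw [pvCell_toNat mat _ _ (by omega) (by omega)] at h2
      refine ⟨by omega, ?_⟩; convert h2 using 2 <;> omega
    · rintro ⟨h1, h2⟩
      refine ⟨by omega, ?_⟩
      rw [pvCell_toNat mat _ _ (by omega) (by omega)]
      convert h2 using 2 <;> omega
  rw [pvCell_natCast]
  simp only [countOnes, e1, e2, e3, e4]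
  by_cases hz : pvAt mat i j = 0 <;> simp [hz] <;> split_ifs <;> ring

-- B's per-cell contribution, in nat indices
theorem pv_B_cell (mat : List (List Int)) (Rn Cn i j : Nat) :
    ((if (j:Int) + 1 < (Cn:Int) ∧ ((pvCell mat (i:Int) (j:Int) = 0 ∧ pvCell mat (i:Int) ((j:Int)+1) = 1) ∨ (pvCell mat (i:Int) (j:Int) = 1 ∧ pvCell mat (i:Int) ((j:Int)+1) = 0)) then (1:Int) else 0)
    + (if (i:Int) + 1 < (Rn:Int) ∧ ((pvCell mat (i:Int) (j:Int) = 0 ∧ pvCell mat ((i:Int)+1) (j:Int) = 1) ∨ (pvCell mat (i:Int) (j:Int) = 1 ∧ pvCell mat ((i:Int)+1) (j:Int) = 0)) then (1:Int) else 0))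
    = (if j+1 < Cn ∧ ((pvAt mat i j = 0 ∧ pvAt mat i (j+1) = 1) ∨ (pvAt mat i j = 1 ∧ pvAt mat i (j+1) = 0)) then (1:Int) else 0)
    + (if i+1 < Rn ∧ ((pvAt mat i j = 0 ∧ pvAt mat (i+1) j = 1) ∨ (pvAt mat i j = 1 ∧ pvAt mat (i+1) j = 0)) then (1:Int) else 0) := by
  have hr : pvCell mat (i:Int) ((j:Int)+1) = pvAt mat i (j+1) := by
    rw [pvCell_toNat mat _ _ (by omega) (by omega)]; congr 1 <;> omega
  have hb : pvCell mat ((i:Int)+1) (j:Int) = pvAt mat (i+1) j := by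
    rw [pvCell_toNat mat _ _ (by omega) (by omega)]; congr 1 <;> omega
  rw [pvCell_natCast, hr, hb]
  congr 1 <;> (congr 1; exact propext (by constructor <;> (rintro ⟨h1, h2⟩; exact ⟨by omega, h2⟩)))

-- guard extraction: right/bottom guards restrict the range
theorem pv_sum_guard_lt (n : Nat) (p : Nat → Prop) [DecidablePred p] :
    (∑ x ∈ Finset.range n, (if x + 1 < n ∧ p x then (1:Int) else 0))
      = ∑ x ∈ Finset.range (n - 1), (if p x then (1:Int) else 0) := by
  cases n with
  | zero => simp
  | succ m =>
    rw [Finset.sum_range_succ]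
    simp only [Nat.succ_sub_one]
    have : ∀ x ∈ Finset.range m, (if x + 1 < m + 1 ∧ p x then (1:Int) else 0) = (if p x then (1:Int) else 0) := by
      intro x hx
      have hxm := Finset.mem_range.mp hx
      have hx2 : x + 1 < m + 1 := by omega
      simp [hx2]
    rw [Finset.sum_congr rfl this]
    simp

-- guard extraction: left/top guards shift the index
theorem pv_sum_guard_ge (n : Nat) (p : Nat → Prop) [DecidablePred p] :
    (∑ x ∈ Finset.range n, (if 1 ≤ x ∧ p x then (1:Int) else 0))
      = ∑ x ∈ Finset.range (n - 1), (if p (x + 1) then (1:Int) else 0) := by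
  cases n with
  | zero => simp
  | succ m =>
    rw [Finset.sum_range_succ']
    simp

-- the two directed (0 next-to 1) indicators merge into one undirected one
theorem pv_pair_merge (v w : Int) :
    (if v = 0 ∧ w = 1 then (1:Int) else 0) + (if w = 0 ∧ v = 1 then (1:Int) else 0)
      = if (v = 0 ∧ w = 1) ∨ (v = 1 ∧ w = 0) then (1:Int) else 0 := by
  split_ifs <;> omega

-- one line (row or column) of cells: A's left+right contributions = B's right-edge contributions
theorem pv_line (n : Nat) (f : Nat → Int) :
    (∑ x ∈ Finset.range n, ((if f x = 0 ∧ x + 1 < n ∧ f (x+1) = 1 then (1:Int) else 0)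
        + (if f x = 0 ∧ 1 ≤ x ∧ f (x-1) = 1 then (1:Int) else 0)))
      = ∑ x ∈ Finset.range n, (if x + 1 < n ∧ ((f x = 0 ∧ f (x+1) = 1) ∨ (f x = 1 ∧ f (x+1) = 0)) then (1:Int) else 0) := by
  rw [Finset.sum_add_distrib]
  have h1 : (∑ x ∈ Finset.range n, (if f x = 0 ∧ x + 1 < n ∧ f (x+1) = 1 then (1:Int) else 0))
      = ∑ x ∈ Finset.range (n-1), (if f x = 0 ∧ f (x+1) = 1 then (1:Int) else 0) := by
    rw [← pv_sum_guard_lt n (fun x => f x = 0 ∧ f (x+1) = 1)]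
    exact Finset.sum_congr rfl (by intro x _; congr 1; exact propext (by tauto))
  have h2 : (∑ x ∈ Finset.range n, (if f x = 0 ∧ 1 ≤ x ∧ f (x-1) = 1 then (1:Int) else 0))
      = ∑ x ∈ Finset.range (n-1), (if f (x+1) = 0 ∧ f x = 1 then (1:Int) else 0) := by
    have h2a : (∑ x ∈ Finset.range n, (if f x = 0 ∧ 1 ≤ x ∧ f (x-1) = 1 then (1:Int) else 0))
        = ∑ x ∈ Finset.range n, (if 1 ≤ x ∧ (f x = 0 ∧ f (x-1) = 1) then (1:Int) else 0) :=
      Finset.sum_congr rfl (by intro x _; congr 1; exact propext (by tauto))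
    rw [h2a, pv_sum_guard_ge n (fun x => f x = 0 ∧ f (x-1) = 1)]
    exact Finset.sum_congr rfl (by intro x _; simp)
  rw [h1, h2, ← Finset.sum_add_distrib, pv_sum_guard_lt n
      (fun x => (f x = 0 ∧ f (x+1) = 1) ∨ (f x = 1 ∧ f (x+1) = 0))]
  exact Finset.sum_congr rfl (fun x _ => pv_pair_merge (f x) (f (x+1)))

-- A-shaped double loop (one guarded addition per cell) as a double sum
theorem pv_loopA (Rn Cn : Nat) (P : Int → Int → Prop) [inst : ∀ i j, Decidable (P i j)] (K : Int → Int → Int) :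
    ((PySem.List.pyRange 0 (Rn : Int) 1).foldl (fun count i =>
      (PySem.List.pyRange 0 (Cn : Int) 1).foldl (fun count j =>
        if P i j then count + K i j else count) count) 0)
    = ∑ i ∈ Finset.range Rn, ∑ j ∈ Finset.range Cn, (if P (i:Int) (j:Int) then K (i:Int) (j:Int) else 0) := by
  rw [pv_foldl_step _ _ _
      (fun i => ((PySem.List.pyRange 0 (Cn : Int) 1).map (fun j => if P i j then K i j else 0)).sum)
      (fun c i => pv_foldl_step _ _ _ _ (fun c' j => by by_cases h : P i j <;> simp [h]))]
  rw [zero_add, pv_sum_pyRange]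
  exact Finset.sum_congr rfl (fun i _ => pv_sum_pyRange Cn _)

-- B-shaped double loop (two guarded increments per cell) as a double sum
theorem pv_loopB (Rn Cn : Nat) (P Q : Int → Int → Prop) [instP : ∀ i j, Decidable (P i j)] [instQ : ∀ i j, Decidable (Q i j)] :
    ((PySem.List.pyRange 0 (Rn : Int) 1).foldl (fun count i =>
      (PySem.List.pyRange 0 (Cn : Int) 1).foldl (fun count j =>
        let count1 := if P i j then count + 1 else count
        let count2 := if Q i j then count1 + 1 else count1
        count2) count) 0)
    = ∑ i ∈ Finset.range Rn, ∑ j ∈ Finset.range Cn,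
        ((if P (i:Int) (j:Int) then (1:Int) else 0) + (if Q (i:Int) (j:Int) then (1:Int) else 0)) := by
  rw [pv_foldl_step _ _ _
      (fun i => ((PySem.List.pyRange 0 (Cn : Int) 1).map (fun j => (if P i j then (1:Int) else 0) + (if Q i j then (1:Int) else 0))).sum)
      (fun c i => pv_foldl_step _ _ _ _
        (fun c' j => by by_cases h1 : P i j <;> by_cases h2 : Q i j <;> simp [h1, h2] <;> ring))]
  rw [zero_add, pv_sum_pyRange]
  exact Finset.sum_congr rfl (fun i _ => pv_sum_pyRange Cn _)

-- the heart: A's four per-zero-cell neighbour indicators sum to B's per-edge indicators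
theorem pv_sums_eq (mat : List (List Int)) (Rn Cn : Nat) :
    (∑ i ∈ Finset.range Rn, ∑ j ∈ Finset.range Cn,
      ((if pvAt mat i j = 0 ∧ 1 ≤ i ∧ pvAt mat (i-1) j = 1 then (1:Int) else 0)
       + (if pvAt mat i j = 0 ∧ i+1 < Rn ∧ pvAt mat (i+1) j = 1 then (1:Int) else 0)
       + (if pvAt mat i j = 0 ∧ 1 ≤ j ∧ pvAt mat i (j-1) = 1 then (1:Int) else 0)
       + (if pvAt mat i j = 0 ∧ j+1 < Cn ∧ pvAt mat i (j+1) = 1 then (1:Int) else 0)))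
    = ∑ i ∈ Finset.range Rn, ∑ j ∈ Finset.range Cn,
      ((if j+1 < Cn ∧ ((pvAt mat i j = 0 ∧ pvAt mat i (j+1) = 1) ∨ (pvAt mat i j = 1 ∧ pvAt mat i (j+1) = 0)) then (1:Int) else 0)
       + (if i+1 < Rn ∧ ((pvAt mat i j = 0 ∧ pvAt mat (i+1) j = 1) ∨ (pvAt mat i j = 1 ∧ pvAt mat (i+1) j = 0)) then (1:Int) else 0)) := by
  have step1 : (∑ i ∈ Finset.range Rn, ∑ j ∈ Finset.range Cn,
      ((if pvAt mat i j = 0 ∧ 1 ≤ i ∧ pvAt mat (i-1) j = 1 then (1:Int) else 0)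
       + (if pvAt mat i j = 0 ∧ i+1 < Rn ∧ pvAt mat (i+1) j = 1 then (1:Int) else 0)
       + (if pvAt mat i j = 0 ∧ 1 ≤ j ∧ pvAt mat i (j-1) = 1 then (1:Int) else 0)
       + (if pvAt mat i j = 0 ∧ j+1 < Cn ∧ pvAt mat i (j+1) = 1 then (1:Int) else 0)))
      = (∑ i ∈ Finset.range Rn, ∑ j ∈ Finset.range Cn,
          ((if pvAt mat i j = 0 ∧ j+1 < Cn ∧ pvAt mat i (j+1) = 1 then (1:Int) else 0)
           + (if pvAt mat i j = 0 ∧ 1 ≤ j ∧ pvAt mat i (j-1) = 1 then (1:Int) else 0)))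
        + (∑ i ∈ Finset.range Rn, ∑ j ∈ Finset.range Cn,
          ((if pvAt mat i j = 0 ∧ i+1 < Rn ∧ pvAt mat (i+1) j = 1 then (1:Int) else 0)
           + (if pvAt mat i j = 0 ∧ 1 ≤ i ∧ pvAt mat (i-1) j = 1 then (1:Int) else 0))) := by
    rw [← Finset.sum_add_distrib]
    exact Finset.sum_congr rfl (fun i _ => by
      rw [← Finset.sum_add_distrib]
      exact Finset.sum_congr rfl (fun j _ => by ring))
  rw [step1]
  have step2 : (∑ i ∈ Finset.range Rn, ∑ j ∈ Finset.range Cn,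
      ((if pvAt mat i j = 0 ∧ j+1 < Cn ∧ pvAt mat i (j+1) = 1 then (1:Int) else 0)
       + (if pvAt mat i j = 0 ∧ 1 ≤ j ∧ pvAt mat i (j-1) = 1 then (1:Int) else 0)))
      = ∑ i ∈ Finset.range Rn, ∑ j ∈ Finset.range Cn,
          (if j+1 < Cn ∧ ((pvAt mat i j = 0 ∧ pvAt mat i (j+1) = 1) ∨ (pvAt mat i j = 1 ∧ pvAt mat i (j+1) = 0)) then (1:Int) else 0) :=
    Finset.sum_congr rfl (fun i _ => pv_line Cn (fun j => pvAt mat i j))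
  have step3 : (∑ i ∈ Finset.range Rn, ∑ j ∈ Finset.range Cn,
      ((if pvAt mat i j = 0 ∧ i+1 < Rn ∧ pvAt mat (i+1) j = 1 then (1:Int) else 0)
       + (if pvAt mat i j = 0 ∧ 1 ≤ i ∧ pvAt mat (i-1) j = 1 then (1:Int) else 0)))
      = ∑ i ∈ Finset.range Rn, ∑ j ∈ Finset.range Cn,
          (if i+1 < Rn ∧ ((pvAt mat i j = 0 ∧ pvAt mat (i+1) j = 1) ∨ (pvAt mat i j = 1 ∧ pvAt mat (i+1) j = 0)) then (1:Int) else 0) := by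
    rw [Finset.sum_comm]
    rw [Finset.sum_congr rfl (fun j _ => pv_line Rn (fun i => pvAt mat i j))]
    exact Finset.sum_comm
  rw [step2, step3, ← Finset.sum_add_distrib]
  exact Finset.sum_congr rfl (fun i _ => (Finset.sum_add_distrib).symm)

-- the two ports compute the same integer
theorem pv_cov_eq (mat : List (List Int)) : coverageOfMatrix mat = coverageOfMatrix_alt mat := by
  simp only [coverageOfMatrix, coverageOfMatrix_alt]
  rw [pv_loopA mat.length (PySem.List.pyGetD mat 0 []).length
      (fun i j => pvCell mat i j = 0)
      (fun i j => countOnes mat (i-1) (i+1) (j-1) (j+1) (mat.length : Int) ((PySem.List.pyGetD mat 0 []).length : Int))]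
  rw [pv_loopB mat.length (PySem.List.pyGetD mat 0 []).length
      (fun i j => j + 1 < ((PySem.List.pyGetD mat 0 []).length : Int) ∧ ((pvCell mat i j = 0 ∧ pvCell mat i (j+1) = 1) ∨ (pvCell mat i j = 1 ∧ pvCell mat i (j+1) = 0)))
      (fun i j => i + 1 < (mat.length : Int) ∧ ((pvCell mat i j = 0 ∧ pvCell mat (i+1) j = 1) ∨ (pvCell mat i j = 1 ∧ pvCell mat (i+1) j = 0)))]
  rw [Finset.sum_congr rfl (fun i _ => Finset.sum_congr rfl
      (fun j _ => pv_A_cell mat mat.length (PySem.List.pyGetD mat 0 []).length i j))]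
  rw [Finset.sum_congr rfl (fun i _ => Finset.sum_congr rfl
      (fun j _ => pv_B_cell mat mat.length (PySem.List.pyGetD mat 0 []).length i j))]
  exact pv_sums_eq mat mat.length (PySem.List.pyGetD mat 0 []).length

-- ===== VERDICT (by name: the statement is the Claim_ definition above) =====
theorem coverageOfMatrix_spec : Claim_equal_coverageOfMatrix := by
  intro mat _ _
  exact pv_cov_eq mat
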